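-- pv_equiv track=rewrite | github.com/ahmedfawzy98/Database-filler | Classes/write_to_database.py | match_insts_names
-- ===== SOURCE A (Python) =====
-- def match_insts_names(inst_identifier, course_name, instructors):
--     insts_identifiers = list(instructors.keys())
--     insts_identifiers.sort()
--     counter = 0
--     name1_words = inst_identifier.split(' ')
--     for identifier in insts_identifiers:
--         if course_name in identifier:
--             name2_words = identifier.split(' ')
--             for word in name1_words:
--                 for word2 in name2_words:
--                     if word == word2:
--                         counter += 1
--             if counter >= len(course_name.split(' ')) + 2:
--                 if len(identifier) > len(inst_identifier):
--                     return [identifier, 'yes']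
--                 else:
--                     return [inst_identifier, identifier, 'update']
--             counter = 0
--     return [inst_identifier, 'no']
-- ===== SOURCE B (Python) =====
-- def match_insts_names(inst_identifier, course_name, instructors):
--     # Selection by minimum instead of sort-then-scan: the first qualifying key in
--     # sorted order is the lexicographically smallest qualifying key, so keep a
--     # running minimum over the (unsorted) keys -- no sort at all.
--     name1_words = inst_identifier.split(' ')
--     threshold = len(course_name.split(' ')) + 2
--     best = None
--     for identifier in instructors.keys():
--         if course_name in identifier:
--             shared = sum(name1_words.count(w) for w in identifier.split(' '))
--             if shared >= threshold and (best is None or identifier < best):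
--                 best = identifier
--     if best is None:
--         return [inst_identifier, 'no']
--     if len(best) > len(inst_identifier):
--         return [best, 'yes']
--     return [inst_identifier, best, 'update']
-- ===== Notes on version B (the rewrite author's own statement) =====
-- stated objective: alternative
-- what changed: B never sorts: it scans the dict keys once keeping the lexicographically smallest qualifying key (a running minimum), scoring each candidate by summing name1_words.count(w) over its words, instead of A's sort-then-scan with early return and a pairwise double word loop.
import Mathlib
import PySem

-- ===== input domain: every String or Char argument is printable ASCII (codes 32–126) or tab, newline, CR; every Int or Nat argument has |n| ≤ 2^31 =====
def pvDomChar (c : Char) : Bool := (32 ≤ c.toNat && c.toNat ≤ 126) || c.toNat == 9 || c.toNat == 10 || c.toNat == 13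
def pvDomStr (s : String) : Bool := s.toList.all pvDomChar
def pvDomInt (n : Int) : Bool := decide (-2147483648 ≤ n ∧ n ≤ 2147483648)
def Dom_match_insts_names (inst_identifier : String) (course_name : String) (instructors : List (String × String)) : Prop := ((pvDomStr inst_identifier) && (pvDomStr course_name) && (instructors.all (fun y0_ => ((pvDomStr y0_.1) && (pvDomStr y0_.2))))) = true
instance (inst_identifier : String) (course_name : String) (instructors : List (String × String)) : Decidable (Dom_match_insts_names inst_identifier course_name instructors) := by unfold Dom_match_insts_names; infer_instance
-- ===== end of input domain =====

-- B replaces A's sort-then-scan-with-early-return by a single pass over the unsorted dict keys that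
-- keeps the lexicographically smallest qualifying key (a running minimum), scoring each candidate by
-- summing word counts instead of A's pairwise double loop (objective: alternative; return value only).

-- s.split(' ') — sep " " ≠ "", so split? always returns some; shared by both ports
def pvSplitSp (s : String) : List String := (PySem.Str.split? s " ").getD []

-- ===== PORT A =====
def pvALoop (inst_identifier : String) (course_name : String) (name1_words : List String) :
    List String → Int → List String
  | [], _ => [inst_identifier, "no"]
  | identifier :: rest, counter =>
    if PySem.Str.isIn course_name identifier then
      let name2_words := pvSplitSp identifier
      let counter :=
        name1_words.foldl (fun c word =>
          name2_words.foldl (fun c word2 => if word == word2 then c + 1 else c) c) counter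
      if ((pvSplitSp course_name).length : Int) + 2 ≤ counter then
        if PySem.Str.len inst_identifier < PySem.Str.len identifier then
          [identifier, "yes"]
        else
          [inst_identifier, identifier, "update"]
      else pvALoop inst_identifier course_name name1_words rest 0
    else pvALoop inst_identifier course_name name1_words rest counter

def match_insts_names (inst_identifier : String) (course_name : String) (instructors : List (String × String)) : List String :=
  let insts_identifiers := PySem.List.sorted ((PySem.Dict.ofList instructors).keys) (fun x => x) false
  pvALoop inst_identifier course_name (pvSplitSp inst_identifier) insts_identifiers 0

-- ===== PORT B =====
def match_insts_names_alt (inst_identifier : String) (course_name : String) (instructors : List (String × String)) : List String :=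
  let name1_words := pvSplitSp inst_identifier
  let threshold : Int := ((pvSplitSp course_name).length : Int) + 2
  let best : Option String :=
    ((PySem.Dict.ofList instructors).keys).foldl
      (fun best identifier =>
        if PySem.Str.isIn course_name identifier then
          let shared := ((pvSplitSp identifier).map (fun w => (name1_words.count w : Int))).sum
          if decide (threshold ≤ shared)
              && (match best with | none => true | some b => decide (identifier < b)) then
            some identifier
          else best
        else best) none
  match best with
  | none => [inst_identifier, "no"]
  | some best =>
    if PySem.Str.len inst_identifier < PySem.Str.len best then [best, "yes"]
    else [inst_identifier, best, "update"]

-- ===== PRECONDITION & SPEC =====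
def Spec_match_insts_names (inst_identifier : String) (course_name : String) (instructors : List (String × String)) (out : List String) : Prop := out = match_insts_names_alt inst_identifier course_name instructors
instance (inst_identifier : String) (course_name : String) (instructors : List (String × String)) (out : List String) : Decidable (Spec_match_insts_names inst_identifier course_name instructors out) := by unfold Spec_match_insts_names; infer_instance

-- ===== CLAIM (what is proved, stated in full; the proofs are below) =====
def Claim_equal_match_insts_names : Prop := ∀ (inst_identifier : String) (course_name : String) (instructors : List (String × String)), Dom_match_insts_names inst_identifier course_name instructors → Spec_match_insts_names inst_identifier course_name instructors (match_insts_names inst_identifier course_name instructors)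

-- ===== LEMMAS AND PROOFS =====

-- the qualification predicate both programs decide for one candidate, and the common output shapes
def pvScore (inst identifier : String) : Int :=
  ((pvSplitSp identifier).map (fun w => ((pvSplitSp inst).count w : Int))).sum

def pvQual (inst cn identifier : String) : Bool :=
  PySem.Str.isIn cn identifier && decide (((pvSplitSp cn).length : Int) + 2 ≤ pvScore inst identifier)

def pvFinish (inst : String) : Option String → List String
  | none => [inst, "no"]
  | some best =>
    if PySem.Str.len inst < PySem.Str.len best then [best, "yes"]
    else [inst, best, "update"]

theorem pvBeqComm (w a : String) : (w == a) = (a == w) := by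
  by_cases h : w = a
  · simp [h]
  · simp [h, Ne.symm h]

-- indicator sum = count
theorem pvIndSum (x : String) (l : List String) :
    (l.map (fun w => if x == w then (1 : Int) else 0)).sum = (l.count x : Int) := by
  induction l with
  | nil => simp
  | cons y ys ih =>
    simp only [List.map_cons, List.sum_cons, List.count_cons, ih]
    by_cases h : x = y
    · simp [h]; omega
    · simp [h, Ne.symm h]

-- symmetry of the shared-word score
theorem pvCountSym (ws1 ws2 : List String) :
    (ws1.map (fun w => (ws2.count w : Int))).sum = (ws2.map (fun w => (ws1.count w : Int))).sum := by
  induction ws1 with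
  | nil => simp
  | cons x xs ih =>
    simp only [List.map_cons, List.sum_cons, ih, List.count_cons]
    push_cast
    rw [List.sum_map_add, pvIndSum]
    omega

-- A's double loop equals counter + B's score
theorem pvPairCount_eq (inst identifier : String) (c : Int) :
    (pvSplitSp inst).foldl (fun c word =>
        (pvSplitSp identifier).foldl (fun c word2 => if word == word2 then c + 1 else c) c) c
      = c + pvScore inst identifier := by
  have hinner : ∀ (w : String) (a : Int),
      (pvSplitSp identifier).foldl (fun c word2 => if w == word2 then c + 1 else c) a
        = a + ((pvSplitSp identifier).count w : Int) := by
    intro w a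
    have h := PySem.List.foldl_count_if (fun word2 => w == word2) (pvSplitSp identifier) a
    have hp : List.countP (fun word2 => w == word2) (pvSplitSp identifier)
        = (pvSplitSp identifier).count w := by
      rw [List.count_eq_countP]
      exact List.countP_congr (fun b _ => by rw [pvBeqComm])
    rw [h, hp]
  calc (pvSplitSp inst).foldl (fun c word =>
          (pvSplitSp identifier).foldl (fun c word2 => if word == word2 then c + 1 else c) c) c
      = (pvSplitSp inst).foldl (fun c word => c + ((pvSplitSp identifier).count word : Int)) c := by
        exact PySem.List.foldl_congr_mem _ _ _ _ (fun a x _ => hinner x a)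
    _ = c + ((pvSplitSp inst).map (fun w => ((pvSplitSp identifier).count w : Int))).sum :=
        PySem.List.foldl_add _ _ c
    _ = c + pvScore inst identifier := by unfold pvScore; rw [pvCountSym]

-- A's loop returns the shape of the FIRST qualifying element
theorem pvALoop_find (inst cn : String) (l : List String) :
    pvALoop inst cn (pvSplitSp inst) l 0 = pvFinish inst (l.find? (pvQual inst cn)) := by
  induction l with
  | nil => rfl
  | cons identifier rest ih =>
    simp only [pvALoop, List.find?_cons]
    by_cases hin : PySem.Str.isIn cn identifier
    · rw [if_pos hin, pvPairCount_eq]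
      simp only [zero_add]
      by_cases hth : ((pvSplitSp cn).length : Int) + 2 ≤ pvScore inst identifier
      · have hq : pvQual inst cn identifier = true := by
          unfold pvQual; rw [hin, decide_eq_true hth]; rfl
        rw [if_pos hth, hq]
        simp [pvFinish]
      · have hq : pvQual inst cn identifier = false := by
          unfold pvQual; rw [decide_eq_false hth, Bool.and_false]
        rw [if_neg hth, hq]
        simpa using ih
    · have hin' : PySem.Str.isIn cn identifier = false := by
        revert hin; cases PySem.Str.isIn cn identifier <;> simp
      have hq : pvQual inst cn identifier = false := by
        unfold pvQual; rw [hin', Bool.false_and]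
      rw [if_neg hin, hq]
      simpa using ih
-- the option-min combiner B's step reduces to on qualifying elements
def pvComb (best : Option String) (identifier : String) : Option String :=
  match best with
  | none => some identifier
  | some b => if identifier < b then some identifier else some b

-- B's fold = fold of the combiner over the qualifying elements
theorem pvBFold_filter (inst cn : String) (l : List String) (acc : Option String) :
    l.foldl (fun best identifier =>
        if PySem.Str.isIn cn identifier then
          if decide (((pvSplitSp cn).length : Int) + 2
                ≤ ((pvSplitSp identifier).map (fun w => ((pvSplitSp inst).count w : Int))).sum)
              && (match best with | none => true | some b => decide (identifier < b)) then
            some identifier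
          else best
        else best) acc
      = (l.filter (pvQual inst cn)).foldl pvComb acc := by
  induction l generalizing acc with
  | nil => rfl
  | cons identifier rest ih =>
    simp only [List.foldl_cons, List.filter_cons]
    by_cases hin : PySem.Str.isIn cn identifier
    · by_cases hth : ((pvSplitSp cn).length : Int) + 2 ≤ pvScore inst identifier
      · have hq : pvQual inst cn identifier = true := by
          unfold pvQual; rw [hin, decide_eq_true hth]; rfl
        have hd : decide (((pvSplitSp cn).length : Int) + 2
              ≤ ((pvSplitSp identifier).map (fun w => ((pvSplitSp inst).count w : Int))).sum) = true :=
          decide_eq_true hth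
        rw [hq, if_pos hin, hd]
        have hstep : (if (true && (match acc with | none => true | some b => decide (identifier < b))) = true then
            some identifier else acc) = pvComb acc identifier := by
          cases acc with
          | none => rfl
          | some b =>
            by_cases hlt : identifier < b
            · simp [pvComb, hlt]
            · simp [pvComb, hlt]
        rw [hstep]
        simpa using ih (pvComb acc identifier)
      · have hq : pvQual inst cn identifier = false := by
          unfold pvQual; rw [decide_eq_false hth, Bool.and_false]
        have hd : decide (((pvSplitSp cn).length : Int) + 2
              ≤ ((pvSplitSp identifier).map (fun w => ((pvSplitSp inst).count w : Int))).sum) = false :=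
          decide_eq_false hth
        rw [hq, if_pos hin, hd]
        simpa using ih acc
    · have hin' : PySem.Str.isIn cn identifier = false := by
        revert hin; cases PySem.Str.isIn cn identifier <;> simp
      have hq : pvQual inst cn identifier = false := by
        unfold pvQual; rw [hin', Bool.false_and]
      rw [hq, if_neg hin]
      simpa using ih acc

theorem pvComb_some (b : String) (l : List String) :
    l.foldl pvComb (some b) = some (l.foldl min b) := by
  induction l generalizing b with
  | nil => rfl
  | cons a rest ih =>
    simp only [List.foldl_cons]
    have hc : pvComb (some b) a = some (min b a) := by
      by_cases h : a < b
      · simp [pvComb, h, min_eq_right (le_of_lt h)]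
      · simp [pvComb, h, min_eq_left (not_lt.mp h)]
    rw [hc, ih]

theorem pvComb_min? (l : List String) : l.foldl pvComb none = l.min? := by
  cases l with
  | nil => rfl
  | cons a rest => rw [List.foldl_cons, List.min?_cons']; exact pvComb_some a rest

-- first qualifying element of the sorted keys = minimum of the qualifying keys
theorem pvFind_sorted_min (P : String → Bool) (ks : List String) :
    (PySem.List.sorted ks (fun x => x) false).find? P = (ks.filter P).min? := by
  rw [← List.head?_filter]
  have hperm : ((PySem.List.sorted ks (fun x => x) false).filter P).Perm (ks.filter P) :=
    (PySem.List.sorted_perm ks (fun x => x) false).filter P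
  have hpair : ((PySem.List.sorted ks (fun x => x) false).filter P).Pairwise (· ≤ ·) :=
    List.Pairwise.filter P (PySem.List.sorted_pairwise ks (fun x => x))
  cases hF : (PySem.List.sorted ks (fun x => x) false).filter P with
  | nil =>
    have : ks.filter P = [] := List.Perm.eq_nil (hF ▸ hperm).symm
    simp [this]
  | cons h t =>
    rw [hF] at hperm hpair
    rw [List.head?_cons]
    symm
    rw [List.min?_eq_some_iff]
    constructor
    · exact hperm.mem_iff.mp (List.mem_cons_self)
    · intro b hb
      have hb' : b ∈ h :: t := hperm.symm.mem_iff.mp hb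
      rcases List.mem_cons.mp hb' with rfl | hbt
      · exact le_refl _
      · exact (List.pairwise_cons.mp hpair).1 b hbt

-- ===== VERDICT (by name: the statement is the Claim_ definition above) =====
theorem match_insts_names_spec : Claim_equal_match_insts_names := by
  intro inst cn instructors _
  unfold Spec_match_insts_names match_insts_names match_insts_names_alt
  rw [pvALoop_find, pvFind_sorted_min, ← pvComb_min?, ← pvBFold_filter]
  rfl
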